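-- pv_equiv track=rewrite | github.com/zepetto7065/study_codingTest | 4주차/문제/유상문_42840_모의고사.py | solution
-- ===== SOURCE A (Python) =====
-- def makePatten(length, sample) :
--     sample = sample * int(length / len(sample) + 1)
--     return sample[0 :length]
--
-- def checkAnswer(answers, supo):
--     result = 0
--
--     for i in range(len(answers)) :
--         if answers[i] == supo[i]:
--             result += 1
--
--     return result
--
-- def solution(answers) :
--     answer = []
--     length = len(answers)
--     # 답안지 만들기
--     supo1 = makePatten(length, list(range(1, 6)))
--     supo2 = makePatten(length, [2, 1, 2, 3, 2, 4, 2, 5])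
--     supo3 = makePatten(length, [3, 3, 1, 1, 2, 2, 4, 4, 5, 5])
--
--     #채점하기
--     result1 = checkAnswer(answers, supo1)
--     result2 = checkAnswer(answers, supo2)
--     result3 = checkAnswer(answers, supo3)
--
--     results = [result1, result2, result3]
--
--     for i , n in enumerate(results):
--         if n == max(results):
--             answer.append(i+1)
--
--
--     return answer
-- ===== SOURCE B (Python) =====
-- def solution(answers):
--     patterns = [[1, 2, 3, 4, 5],
--                 [2, 1, 2, 3, 2, 4, 2, 5],
--                 [3, 3, 1, 1, 2, 2, 4, 4, 5, 5]]
--     # 40 = lcm of the three pattern periods, so every pattern is constant on a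
--     # residue class mod 40: build one histogram of (i % 40, answers[i]) pairs,
--     # then score each pattern by reading 40 cells of the histogram.
--     hist = {}
--     for i, a in enumerate(answers):
--         key = (i % 40, a)
--         hist[key] = hist.get(key, 0) + 1
--     scores = [sum(hist.get((r, p[r % len(p)]), 0) for r in range(40)) for p in patterns]
--     best = max(scores)
--     return [i + 1 for i, s in enumerate(scores) if s == best]
-- ===== Notes on version B (the rewrite author's own statement) =====
-- stated objective: alternative
-- what changed: Instead of materializing three full-length pattern copies and scoring each in its own counting pass, B builds one histogram keyed by (index mod 40, answer) (40 = lcm of the pattern periods) in a single pass and then reads each pattern's score off 40 histogram cells, finally emitting 1/2/3 for the scores equal to the max.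
import Mathlib
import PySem

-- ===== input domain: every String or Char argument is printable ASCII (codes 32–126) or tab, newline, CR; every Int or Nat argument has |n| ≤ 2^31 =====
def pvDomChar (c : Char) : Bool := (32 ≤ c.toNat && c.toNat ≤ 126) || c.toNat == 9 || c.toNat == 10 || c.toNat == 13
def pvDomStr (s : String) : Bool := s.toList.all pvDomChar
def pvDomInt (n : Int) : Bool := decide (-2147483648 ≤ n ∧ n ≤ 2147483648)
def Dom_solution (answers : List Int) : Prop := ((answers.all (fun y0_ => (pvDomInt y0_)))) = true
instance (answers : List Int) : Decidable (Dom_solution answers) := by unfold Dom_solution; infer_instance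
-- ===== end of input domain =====

-- B replaces A's three materialized full-length patterns and three counting passes by a
-- single histogram of (index mod 40, answer) pairs (40 = lcm of the pattern periods),
-- from which each pattern's score is read off in 40 lookups (objective: alternative).

-- ===== PORT A =====
-- makePatten(length, sample): 'sample * int(length/len(sample) + 1)' then slice [0:length].
-- 'length' is len(answers), a Nat; int(length/len(sample)+1) = length/len(sample) + 1 in Nat
-- division (exact for the nonnegative lengths used here), and sample[0:length] = take length.
def makePatten (length : Nat) (sample : List Int) : List Int :=
  (List.replicate (length / sample.length + 1) sample).flatten.take length

-- checkAnswer: 'for i in range(len(answers)): if answers[i] == supo[i]: result += 1';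
-- every i is in range for both lists here, so getD's default is never read.
def checkAnswer (answers supo : List Int) : Int :=
  (List.range answers.length).foldl
    (fun result i => if answers.getD i 0 = supo.getD i 0 then result + 1 else result) 0

def solution (answers : List Int) : List Int :=
  let length := answers.length
  let supo1 := makePatten length [1, 2, 3, 4, 5]
  let supo2 := makePatten length [2, 1, 2, 3, 2, 4, 2, 5]
  let supo3 := makePatten length [3, 3, 1, 1, 2, 2, 4, 4, 5, 5]
  let result1 := checkAnswer answers supo1
  let result2 := checkAnswer answers supo2
  let result3 := checkAnswer answers supo3
  let results := [result1, result2, result3]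
  (PySem.List.enumerate results).foldl
    (fun answer p =>
      if p.2 = (PySem.List.max? results id).getD 0 then answer ++ [p.1 + 1] else answer) []

-- ===== PORT B =====
-- hist[key] = hist.get(key, 0) + 1  is  Dict.modify key 0 (· + 1);
-- sum(... for r in range(40)) is the sum of the mapped range.
def solution_alt (answers : List Int) : List Int :=
  let patterns : List (List Int) :=
    [[1, 2, 3, 4, 5], [2, 1, 2, 3, 2, 4, 2, 5], [3, 3, 1, 1, 2, 2, 4, 4, 5, 5]]
  let hist : PySem.Dict (Int × Int) Int :=
    (PySem.List.enumerate answers).foldl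
      (fun h ia => h.modify (PySem.Int.mod ia.1 40, ia.2) 0 (· + 1)) PySem.Dict.empty
  let scores := patterns.map (fun p =>
    ((PySem.List.pyRange 0 40 1).map
      (fun r => hist.getD (r, PySem.List.pyGetD p (PySem.Int.mod r (p.length : Int)) 0) 0)).sum)
  let best := (PySem.List.max? scores id).getD 0
  ((PySem.List.enumerate scores).filter (fun q => q.2 == best)).map (fun q => q.1 + 1)

-- ===== PRECONDITION & SPEC =====
def Spec_solution (answers : List Int) (out : List Int) : Prop := out = solution_alt answers
instance (answers : List Int) (out : List Int) : Decidable (Spec_solution answers out) := by unfold Spec_solution; infer_instance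

-- ===== CLAIM (what is proved, stated in full; the proofs are below) =====
def Claim_equal_solution : Prop := ∀ (answers : List Int), Dom_solution answers → Spec_solution answers (solution answers)

-- ===== LEMMAS AND PROOFS =====

-- Reference count: matches of xs against pattern p cyclically, starting at position k.
def mcnt (p : List Int) (k : Nat) : List Int → Int
  | [] => 0
  | a :: t => (if a = p.getD (k % p.length) 0 then 1 else 0) + mcnt p (k + 1) t

theorem flatten_replicate_getD (p : List Int) (hp : p ≠ []) :
    ∀ (k i : Nat), i < k * p.length →
      ((List.replicate k p).flatten.getD i 0) = p.getD (i % p.length) 0 := by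
  intro k
  induction k with
  | zero => intro i h; omega
  | succ k ih =>
      intro i h
      have hpl : 0 < p.length := List.length_pos_iff.mpr hp
      rw [List.replicate_succ, List.flatten_cons]
      by_cases hi : i < p.length
      · rw [List.getD_append _ _ _ _ hi, Nat.mod_eq_of_lt hi]
      · rw [not_lt] at hi
        obtain ⟨j, rfl⟩ : ∃ j, i = p.length + j := ⟨i - p.length, by omega⟩
        rw [List.getD_append_right _ _ _ _ hi, Nat.add_sub_cancel_left, Nat.add_mod_left]
        exact ih j (by
          have hsm : (k + 1) * p.length = k * p.length + p.length := by ring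
          omega)

theorem makePatten_getD (p : List Int) (hp : p ≠ []) (L i : Nat) (h : i < L) :
    (makePatten L p).getD i 0 = p.getD (i % p.length) 0 := by
  have hpl : 0 < p.length := List.length_pos_iff.mpr hp
  unfold makePatten
  rw [List.getD_eq_getElem?_getD, List.getElem?_take_of_lt h, ← List.getD_eq_getElem?_getD]
  refine flatten_replicate_getD p hp _ i ?_
  have h1 := Nat.div_add_mod L p.length
  have h2 : L % p.length < p.length := Nat.mod_lt _ hpl
  have h3 : (L / p.length + 1) * p.length = L / p.length * p.length + p.length := by ring
  have h4 : L / p.length * p.length = p.length * (L / p.length) := Nat.mul_comm _ _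
  omega

theorem mcnt_eq_countP (p : List Int) :
    ∀ (xs : List Int) (k : Nat),
      mcnt p k xs =
        ((List.range xs.length).countP
          (fun i => xs.getD i 0 = p.getD ((k + i) % p.length) 0) : Int) := by
  intro xs
  induction xs with
  | nil => intro k; simp [mcnt]
  | cons a t ih =>
      intro k
      rw [mcnt, ih (k + 1), List.length_cons, List.range_succ_eq_map]
      rw [List.countP_cons, List.countP_map]
      have hcong : ((fun i => decide (((a :: t).getD i 0 = p.getD ((k + i) % p.length) 0))) ∘ Nat.succ)
          = (fun i => decide (t.getD i 0 = p.getD ((k + 1 + i) % p.length) 0)) := by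
        funext i
        simp only [Function.comp_apply, List.getD_cons_succ]
        rw [show (k + i.succ) = (k + 1 + i) from by omega]
      rw [hcong]
      simp only [List.getD_cons_zero, Nat.add_zero, decide_eq_true_eq]
      push_cast
      ring

theorem checkAnswer_mcnt (p answers : List Int) (hp : p ≠ []) :
    checkAnswer answers (makePatten answers.length p) = mcnt p 0 answers := by
  unfold checkAnswer
  rw [show (fun (result : Int) i =>
        if answers.getD i 0 = (makePatten answers.length p).getD i 0 then result + 1 else result)
      = (fun (result : Int) i =>
        if (fun i => decide (answers.getD i 0 = (makePatten answers.length p).getD i 0)) i = true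
        then result + 1 else result) from by funext r i; simp]
  rw [PySem.List.foldl_count_if]
  rw [mcnt_eq_countP p answers 0]
  simp only [Int.zero_add, Nat.cast_inj, Nat.zero_add]
  apply List.countP_congr
  intro i hi
  rw [List.mem_range] at hi
  rw [makePatten_getD p hp answers.length i hi]

-- The 40-cell indicator sum collapses to a single test, q.1 being in [0, 40).
theorem sum_indicator_forty (q : Int × Int) (g : Int → Int)
    (h0 : 0 ≤ q.1) (h40 : q.1 < 40) :
    ((PySem.List.pyRange 0 40 1).map
        (fun r => if (r, g r) = q then (1 : Int) else 0)).sum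
      = if q.2 = g q.1 then 1 else 0 := by
  rw [show (fun r => if (r, g r) = q then (1 : Int) else 0)
      = (fun r => if (fun r => decide ((r, g r) = q)) r = true then (1 : Int) else 0) from by
    funext r; by_cases h : (r, g r) = q <;> simp [h]]
  by_cases hq : q.2 = g q.1
  · have hpred : (fun r => decide ((r, g r) = q)) = (fun r => decide (r = q.1)) := by
      funext r
      simp only [decide_eq_decide, Prod.ext_iff]
      constructor
      · rintro ⟨h1, _⟩; exact h1
      · rintro rfl; exact ⟨rfl, hq.symm⟩
    rw [PySem.List.sum_map_ite_one_zero, hpred, if_pos hq]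
    have hmem : q.1 ∈ PySem.List.pyRange 0 40 1 := by
      rw [PySem.List.mem_pyRange_one]; omega
    rw [show (fun r => decide (r = q.1)) = (fun r => r == q.1) from by funext r; rfl]
    rw [← List.count_eq_countP']
    have := List.count_eq_one_of_mem (PySem.List.nodup_pyRange_one 0 40) hmem
    exact_mod_cast this
  · rw [PySem.List.sum_map_ite_one_zero, if_neg hq]
    have : (PySem.List.pyRange 0 40 1).countP (fun r => decide ((r, g r) = q)) = 0 := by
      apply List.countP_eq_zero.mpr
      intro r _
      simp only [decide_eq_true_eq, Prod.ext_iff, not_and]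
      rintro rfl
      exact fun h2 => hq h2.symm
    rw [this]; rfl

-- Partition: summing per-residue counts over all 40 residues counts every pair once.
theorem sum_count_partition (g : Int → Int) :
    ∀ (L : List (Int × Int)), (∀ q ∈ L, 0 ≤ q.1 ∧ q.1 < 40) →
      ((PySem.List.pyRange 0 40 1).map (fun r => (L.count (r, g r) : Int))).sum
        = (L.countP (fun q => q.2 = g q.1) : Int) := by
  intro L
  induction L with
  | nil => intro _; simp
  | cons q t ih =>
      intro hL
      have hq := hL q (List.mem_cons_self)
      have hmap : (fun r => ((q :: t).count (r, g r) : Int))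
          = (fun r => (t.count (r, g r) : Int) + if (r, g r) = q then 1 else 0) := by
        funext r
        rw [List.count_cons]
        push_cast
        congr 1
        by_cases h : q = (r, g r)
        · simp [h]
        · simp [beq_iff_eq, h, Ne.symm h]
      rw [hmap, PySem.List.sum_map_add_int,
          ih (fun x hx => hL x (List.mem_cons_of_mem q hx)),
          sum_indicator_forty q g hq.1 hq.2, List.countP_cons]
      push_cast
      by_cases h : q.2 = g q.1 <;> simp [h]

-- 0 ≤ i % 40 < 40 for every index produced by enumerate (indices start at a Nat).
theorem enumerate_fst_mod_forty (answers : List Int) :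
    ∀ (k : Nat) (q : Int × Int),
      q ∈ (PySem.List.enumerate answers (k : Int)).map
            (fun ia => (PySem.Int.mod ia.1 40, ia.2)) →
      0 ≤ q.1 ∧ q.1 < 40 := by
  induction answers with
  | nil => intro k q h; simp [PySem.List.enumerate_nil] at h
  | cons a t ih =>
      intro k q h
      rw [PySem.List.enumerate_cons, List.map_cons, List.mem_cons] at h
      rcases h with h | h
      · subst h
        have e40 : PySem.Int.mod (k : Int) 40 = ((k % 40 : Nat) : Int) := by
          exact_mod_cast PySem.Int.mod_natCast k 40
        simp only [e40]
        constructor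
        · exact_mod_cast Nat.zero_le _
        · exact_mod_cast Nat.mod_lt k (by norm_num)
      · have : ((k : Int) + 1) = ((k + 1 : Nat) : Int) := by push_cast; ring
        rw [this] at h
        exact ih (k + 1) q h

-- Counting matches against p at positions reduced mod 40 is the cyclic match count
-- (the period of p divides 40).
theorem countP_mod_forty_mcnt (p : List Int) (hd : p.length ∣ 40) :
    ∀ (answers : List Int) (k : Nat),
      ((PySem.List.enumerate answers (k : Int)).countP
          (fun ia => decide (ia.2 =
            PySem.List.pyGetD p (PySem.Int.mod (PySem.Int.mod ia.1 40) (p.length : Int)) 0)) : Int)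
        = mcnt p k answers := by
  intro answers
  induction answers with
  | nil => intro k; simp [PySem.List.enumerate_nil, mcnt]
  | cons a t ih =>
      intro k
      rw [PySem.List.enumerate_cons, List.countP_cons]
      have hs : ((k : Int) + 1) = ((k + 1 : Nat) : Int) := by push_cast; ring
      rw [hs]
      have hhead : PySem.List.pyGetD p (PySem.Int.mod (PySem.Int.mod (k : Int) 40) (p.length : Int)) 0
          = p.getD (k % p.length) 0 := by
        have e40 : PySem.Int.mod (k : Int) 40 = ((k % 40 : Nat) : Int) := by
          exact_mod_cast PySem.Int.mod_natCast k 40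
        have eL : PySem.Int.mod ((k % 40 : Nat) : Int) (p.length : Int)
            = ((k % 40 % p.length : Nat) : Int) :=
          PySem.Int.mod_natCast (k % 40) p.length
        rw [e40, eL, PySem.List.pyGetD_natCast, Nat.mod_mod_of_dvd k hd]
      rw [mcnt, ← ih (k + 1)]
      simp only [hhead, decide_eq_true_eq]
      push_cast
      split_ifs <;> ring

-- The histogram cell (r, v) holds the number of (i % 40, answers[i]) pairs equal to (r, v).
theorem hist_getD (answers : List Int) (key : Int × Int) :
    ((PySem.List.enumerate answers).foldl
        (fun h ia => h.modify (PySem.Int.mod ia.1 40, ia.2) 0 (· + 1)) PySem.Dict.empty).getD key 0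
      = (((PySem.List.enumerate answers).map (fun ia => (PySem.Int.mod ia.1 40, ia.2))).count key : Int) := by
  rw [← List.foldl_map (f := fun ia : Int × Int => (PySem.Int.mod ia.1 40, ia.2))
        (g := fun (h : PySem.Dict (Int × Int) Int) x => h.modify x 0 (· + 1))]
  rw [PySem.Dict.getD_foldl_modify_add_one]
  simp [PySem.Dict.empty, PySem.Dict.getD, PySem.Dict.get?]

-- One pattern's histogram score equals its cyclic match count.
theorem score_eq_mcnt (answers p : List Int) (hd : p.length ∣ 40) :
    ((PySem.List.pyRange 0 40 1).map
        (fun r => ((PySem.List.enumerate answers).foldl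
            (fun h ia => h.modify (PySem.Int.mod ia.1 40, ia.2) 0 (· + 1))
            PySem.Dict.empty).getD
          (r, PySem.List.pyGetD p (PySem.Int.mod r (p.length : Int)) 0) 0)).sum
      = mcnt p 0 answers := by
  set g : Int → Int := fun r => PySem.List.pyGetD p (PySem.Int.mod r (p.length : Int)) 0 with hg
  have hmap : (fun r => ((PySem.List.enumerate answers).foldl
            (fun h ia => h.modify (PySem.Int.mod ia.1 40, ia.2) 0 (· + 1))
            PySem.Dict.empty).getD (r, g r) 0)
      = (fun r => ((((PySem.List.enumerate answers).map
            (fun ia => (PySem.Int.mod ia.1 40, ia.2))).count (r, g r)) : Int)) := by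
    funext r
    exact hist_getD answers (r, g r)
  have hL0 : ∀ q ∈ (PySem.List.enumerate answers).map (fun ia => (PySem.Int.mod ia.1 40, ia.2)),
      0 ≤ q.1 ∧ q.1 < 40 := by
    have := enumerate_fst_mod_forty answers 0
    simpa using this
  rw [hmap, sum_count_partition g _ hL0]
  rw [List.countP_map]
  rw [show ((fun q : Int × Int => decide (q.2 = g q.1)) ∘ (fun ia : Int × Int => (PySem.Int.mod ia.1 40, ia.2)))
      = (fun ia : Int × Int => decide (ia.2 =
          PySem.List.pyGetD p (PySem.Int.mod (PySem.Int.mod ia.1 40) (p.length : Int)) 0)) from by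
    funext ia; rfl]
  have := countP_mod_forty_mcnt p hd answers 0
  simpa using this

theorem max?_three (a b c : Int) :
    PySem.List.max? [a, b, c] id = some (max a (max b c)) := by
  simp only [PySem.List.max?, List.foldl, id_def]
  by_cases h1 : a < b <;> simp [h1] <;> split_ifs <;> simp [max_def] <;> omega

set_option maxRecDepth 4000 in
theorem solution_eq (answers : List Int) : solution answers = solution_alt answers := by
  unfold solution solution_alt
  dsimp only
  simp only [List.map_cons, List.map_nil]
  rw [score_eq_mcnt answers [1, 2, 3, 4, 5] (by decide),
      score_eq_mcnt answers [2, 1, 2, 3, 2, 4, 2, 5] (by decide),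
      score_eq_mcnt answers [3, 3, 1, 1, 2, 2, 4, 4, 5, 5] (by decide)]
  rw [checkAnswer_mcnt [1, 2, 3, 4, 5] answers (by simp),
      checkAnswer_mcnt [2, 1, 2, 3, 2, 4, 2, 5] answers (by simp),
      checkAnswer_mcnt [3, 3, 1, 1, 2, 2, 4, 4, 5, 5] answers (by simp)]
  set r1 := mcnt [1, 2, 3, 4, 5] 0 answers
  set r2 := mcnt [2, 1, 2, 3, 2, 4, 2, 5] 0 answers
  set r3 := mcnt [3, 3, 1, 1, 2, 2, 4, 4, 5, 5] 0 answers
  rw [max?_three]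
  simp only [Option.getD_some]
  set m := max r1 (max r2 r3) with hm
  by_cases h1 : r1 = m <;>
  by_cases h2 : r2 = m <;>
  by_cases h3 : r3 = m <;>
    simp [PySem.List.enumerate_cons, PySem.List.enumerate_nil, List.foldl,
      List.filter, show ∀ x : Int, (x == m) = decide (x = m) from fun _ => rfl,
      h1, h2, h3]

-- ===== VERDICT (by name: the statement is the Claim_ definition above) =====
theorem solution_spec : Claim_equal_solution := by
  intro answers _
  unfold Spec_solution
  exact solution_eq answers
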